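-- pv_equiv track=rewrite | github.com/pypi-data/pypi-mirror-399 | packages/theauditor/theauditor-2.0.4rc1-py3-none-any.whl/theauditor/commands/query.py | _normalize_path_filter
-- ===== SOURCE A (Python) =====
-- def _normalize_path_filter(path_filter: tuple) -> str | None:
--     """Normalize path filter - handle shell expansion and convert wildcards to SQL LIKE."""
--     if not path_filter:
--         return None
--
--     if len(path_filter) == 1:
--         path = path_filter[0]
--     else:
--         paths = [p.replace("\\", "/") for p in path_filter]
--         if paths:
--             prefix_parts = paths[0].split("/")
--             common_parts = []
--             for i, part in enumerate(prefix_parts):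
--                 if all(p.split("/")[i] == part if len(p.split("/")) > i else False for p in paths):
--                     common_parts.append(part)
--                 else:
--                     break
--             path = "/".join(common_parts) + "/" if common_parts else ""
--         else:
--             return None
--
--     path = path.replace("\\", "/")
--     path = path.replace("**", "%").replace("*", "%").replace("?", "_")
--     if not path.endswith("%") and not path.endswith("/"):
--         path += "%"
--     elif path.endswith("/"):
--         path += "%"
--     return path
-- ===== SOURCE B (Python) =====
-- def _to_like(path):
--     path = path.replace("\\", "/")
--     path = path.replace("**", "%").replace("*", "%").replace("?", "_")
--     if path.endswith("/") or not path.endswith("%"):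
--         path += "%"
--     return path
--
--
-- def _lcp(a, b):
--     out = []
--     for x, y in zip(a, b):
--         if x != y:
--             break
--         out.append(x)
--     return out
--
--
-- def _normalize_path_filter(path_filter: tuple) -> str | None:
--     """Normalize path filter - handle shell expansion and convert wildcards to SQL LIKE."""
--     if not path_filter:
--         return None
--     if len(path_filter) == 1:
--         return _to_like(path_filter[0])
--     splits = [p.replace("\\", "/").split("/") for p in path_filter]
--     common = splits[0]
--     for s in splits[1:]:
--         common = _lcp(common, s)
--     path = "/".join(common) + "/" if common else ""
--     return _to_like(path)
-- ===== Notes on version B (the rewrite author's own statement) =====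
-- stated objective: alternative
-- what changed: The common-prefix step splits each path once and folds a pairwise component-LCP over the split lists, instead of A's per-index scan that re-splits every path at every index inside an all(); the final wildcard/LIKE block is kept.
import Mathlib
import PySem

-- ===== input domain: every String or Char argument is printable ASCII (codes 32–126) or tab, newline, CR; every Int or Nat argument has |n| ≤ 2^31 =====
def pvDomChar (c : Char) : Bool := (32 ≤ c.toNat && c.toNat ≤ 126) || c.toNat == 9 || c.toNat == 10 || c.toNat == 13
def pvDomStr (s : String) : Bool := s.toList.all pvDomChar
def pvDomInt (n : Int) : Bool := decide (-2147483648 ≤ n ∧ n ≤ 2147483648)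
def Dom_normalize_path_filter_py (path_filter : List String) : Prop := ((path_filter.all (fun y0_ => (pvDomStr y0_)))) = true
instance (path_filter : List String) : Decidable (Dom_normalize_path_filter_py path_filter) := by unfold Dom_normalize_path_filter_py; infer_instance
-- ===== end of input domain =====

-- B replaces A's per-index common-prefix scan (which re-splits every path at every index
-- inside an all()) by splitting each path once and folding a pairwise component-LCP;
-- the guards and the final wildcard/LIKE block are unchanged.

-- ===== PORT A =====
-- s.split("/"): the separator "/" is a nonempty literal, so Str.split? is always `some`
def pvSplit (s : String) : List String := (PySem.Str.split? s "/").getD []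

-- the for-loop over enumerate(prefix_parts) with break
def pvALoop (paths : List String) : Nat → List String → List String
  | _, [] => []
  | i, part :: rest =>
    if paths.all (fun p =>
        let sp := pvSplit p
        if i < sp.length then decide (sp.getD i "" = part) else false) then
      part :: pvALoop paths (i + 1) rest
    else []

def normalize_path_filter_py (path_filter : List String) : Option String :=
  if path_filter = [] then none
  else
    let pathOpt : Option String :=
      if path_filter.length = 1 then some (path_filter.headD "")
      else
        let paths := path_filter.map (fun p => PySem.Str.replace p "\\" "/")
        if paths ≠ [] then
          let prefix_parts := pvSplit (paths.headD "")
          let common_parts := pvALoop paths 0 prefix_parts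
          some (if common_parts ≠ [] then PySem.Str.join "/" common_parts ++ "/" else "")
        else none
    match pathOpt with
    | none => none
    | some path =>
      let path := PySem.Str.replace path "\\" "/"
      let path := PySem.Str.replace (PySem.Str.replace (PySem.Str.replace path "**" "%") "*" "%") "?" "_"
      some (if !(PySem.Str.endswith path "%") && !(PySem.Str.endswith path "/") then path ++ "%"
            else if PySem.Str.endswith path "/" then path ++ "%"
            else path)

-- ===== PORT B =====
def pvLcp : List String → List String → List String
  | x :: xs, y :: ys => if x = y then x :: pvLcp xs ys else []
  | _, _ => []

def pvToLike (path : String) : String :=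
  let path := PySem.Str.replace path "\\" "/"
  let path := PySem.Str.replace (PySem.Str.replace (PySem.Str.replace path "**" "%") "*" "%") "?" "_"
  if PySem.Str.endswith path "/" || !(PySem.Str.endswith path "%") then path ++ "%" else path

def normalize_path_filter_py_alt (path_filter : List String) : Option String :=
  match path_filter with
  | [] => none
  | [p] => some (pvToLike p)
  | _ =>
    let splits := path_filter.map (fun p => pvSplit (PySem.Str.replace p "\\" "/"))
    let common := splits.tail.foldl pvLcp (splits.headD [])
    some (pvToLike (if common ≠ [] then PySem.Str.join "/" common ++ "/" else ""))

-- ===== PRECONDITION & SPEC =====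
def Spec_normalize_path_filter_py (path_filter : List String) (out : Option String) : Prop := out = normalize_path_filter_py_alt path_filter
instance (path_filter : List String) (out : Option String) : Decidable (Spec_normalize_path_filter_py path_filter out) := by unfold Spec_normalize_path_filter_py; infer_instance

-- ===== CLAIM (what is proved, stated in full; the proofs are below) =====
def Claim_equal_normalize_path_filter_py : Prop := ∀ (path_filter : List String), Dom_normalize_path_filter_py path_filter → Spec_normalize_path_filter_py path_filter (normalize_path_filter_py path_filter)

-- ===== LEMMAS AND PROOFS =====

-- A's final wildcard/LIKE tail, as one helper (used only by the proofs)
def pvTailA (path : String) : String :=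
  let path1 := PySem.Str.replace path "\\" "/"
  let path2 := PySem.Str.replace (PySem.Str.replace (PySem.Str.replace path1 "**" "%") "*" "%") "?" "_"
  if !(PySem.Str.endswith path2 "%") && !(PySem.Str.endswith path2 "/") then path2 ++ "%"
  else if PySem.Str.endswith path2 "/" then path2 ++ "%"
  else path2

theorem pvTail_eq (path : String) : pvTailA path = pvToLike path := by
  simp only [pvTailA, pvToLike]
  cases h1 : PySem.Str.endswith (PySem.Str.replace (PySem.Str.replace (PySem.Str.replace (PySem.Str.replace path "\\" "/") "**" "%") "*" "%") "?" "_") "%" <;>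
    cases h2 : PySem.Str.endswith (PySem.Str.replace (PySem.Str.replace (PySem.Str.replace (PySem.Str.replace path "\\" "/") "**" "%") "*" "%") "?" "_") "/" <;>
      simp

theorem pvLcp_nil_left (s : List String) : pvLcp [] s = [] := by cases s <;> rfl

theorem foldl_pvLcp_nil (ss : List (List String)) : ss.foldl pvLcp [] = [] := by
  induction ss with
  | nil => rfl
  | cons s ss ih => simp [List.foldl, pvLcp_nil_left, ih]

theorem pvLcp_self (a : List String) : pvLcp a a = a := by
  induction a with
  | nil => rfl
  | cons x xs ih => simp [pvLcp, ih]

theorem foldl_pvLcp_cons (part : String) (rest : List String) (ss : List (List String)) :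
    ss.foldl pvLcp (part :: rest) =
      if ss.all (fun s => decide (s.head? = some part)) then
        part :: (ss.map List.tail).foldl pvLcp rest
      else [] := by
  induction ss generalizing rest with
  | nil => simp
  | cons s ss ih =>
    cases s with
    | nil =>
      have h : pvLcp (part :: rest) [] = [] := rfl
      simp [List.foldl_cons, h, foldl_pvLcp_nil]
    | cons y ys =>
      by_cases hy : y = part
      · subst hy
        have step : pvLcp (y :: rest) (y :: ys) = y :: pvLcp rest ys := by simp [pvLcp]
        rw [List.foldl_cons, step, ih (pvLcp rest ys)]
        simp [List.all_cons, List.foldl_cons]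
      · have step : pvLcp (part :: rest) (y :: ys) = [] := by
          simp [pvLcp]
          intro h
          exact absurd h.symm hy
        rw [List.foldl_cons, step, foldl_pvLcp_nil, if_neg (by simp [hy])]

theorem pvALoop_eq (paths : List String) (i : Nat) (parts : List String) :
    pvALoop paths i parts =
      (paths.map (fun p => (pvSplit p).drop i)).foldl pvLcp parts := by
  induction parts generalizing i with
  | nil => simp [pvALoop, foldl_pvLcp_nil]
  | cons part rest ih =>
    have hguard : (paths.all (fun p =>
        let sp := pvSplit p
        if i < sp.length then decide (sp.getD i "" = part) else false)) =
        ((paths.map (fun p => (pvSplit p).drop i)).all (fun s => decide (s.head? = some part))) := by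
      rw [List.all_map]
      refine congrArg (List.all paths) (funext fun p => ?_)
      show (let sp := pvSplit p
            if i < sp.length then decide (sp.getD i "" = part) else false) =
          decide (((pvSplit p).drop i).head? = some part)
      rw [List.head?_drop]
      by_cases h : i < (pvSplit p).length
      · simp [h, List.getD]
      · simp [h]
    have hmap : (paths.map (fun p => (pvSplit p).drop i)).map List.tail
        = paths.map (fun p => (pvSplit p).drop (i + 1)) := by
      rw [List.map_map]
      refine List.map_congr_left fun p _ => ?_
      show ((pvSplit p).drop i).tail = (pvSplit p).drop (i + 1)
      exact List.tail_drop
    rw [pvALoop, hguard, foldl_pvLcp_cons, hmap, ih (i + 1)]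

-- ===== VERDICT (by name: the statement is the Claim_ definition above) =====
theorem normalize_path_filter_py_spec : Claim_equal_normalize_path_filter_py := by
  intro pf _
  unfold Spec_normalize_path_filter_py
  match pf with
  | [] => rfl
  | [p] =>
    show normalize_path_filter_py [p] = normalize_path_filter_py_alt [p]
    exact congrArg some (pvTail_eq p)
  | p :: q :: rest =>
    show some (pvTailA
        (if pvALoop ((p :: q :: rest).map (fun s => PySem.Str.replace s "\\" "/")) 0
              (pvSplit (((p :: q :: rest).map (fun s => PySem.Str.replace s "\\" "/")).headD "")) ≠ [] then
          PySem.Str.join "/" (pvALoop ((p :: q :: rest).map (fun s => PySem.Str.replace s "\\" "/")) 0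
              (pvSplit (((p :: q :: rest).map (fun s => PySem.Str.replace s "\\" "/")).headD ""))) ++ "/"
        else "")) =
      some (pvToLike
        (if (((p :: q :: rest).map (fun s => pvSplit (PySem.Str.replace s "\\" "/"))).tail.foldl pvLcp
              (((p :: q :: rest).map (fun s => pvSplit (PySem.Str.replace s "\\" "/"))).headD [])) ≠ [] then
          PySem.Str.join "/" (((p :: q :: rest).map (fun s => pvSplit (PySem.Str.replace s "\\" "/"))).tail.foldl pvLcp
              (((p :: q :: rest).map (fun s => pvSplit (PySem.Str.replace s "\\" "/"))).headD [])) ++ "/"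
        else ""))
    have hcommon : pvALoop ((p :: q :: rest).map (fun s => PySem.Str.replace s "\\" "/")) 0
          (pvSplit (((p :: q :: rest).map (fun s => PySem.Str.replace s "\\" "/")).headD "")) =
        ((p :: q :: rest).map (fun s => pvSplit (PySem.Str.replace s "\\" "/"))).tail.foldl pvLcp
          (((p :: q :: rest).map (fun s => pvSplit (PySem.Str.replace s "\\" "/"))).headD []) := by
      rw [pvALoop_eq]
      simp only [List.map_cons, List.map_map, List.headD_cons, List.tail_cons, List.foldl_cons,
        Function.comp_def, List.drop_zero, pvLcp_self]
    rw [hcommon, pvTail_eq]
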